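-- pv_equiv track=rewrite | github.com/acrokat/eecs486 | public_dataset/tweet_process.py | tokenize_commas
-- ===== SOURCE A (Python) =====
-- def tokenize_commas(tokens):
--
--     temp_tokens = []
--     for token in tokens:
--         start_pos = 0
--         index = token.find(',', start_pos)
--         # loop until have checked every ,
--         # remove unnecesary , 's
--         while(index != -1):
--             start_pos = index
--             if index == 0:
--                 token = token[1:]
--             elif index == len(token)-1:
--                 token = token[:len(token)-1]
--             elif not token[index-1:index].isdigit() or not token[index+1:index+2].isdigit():
--                 token = token[:index] + token[index+1:]
--             else:
--                 start_pos = start_pos + 1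
--             index = token.find(',', start_pos)
--
--         # check for now empty strings
--         if token:
--             temp_tokens.append(token)
--
--     return temp_tokens
-- ===== SOURCE B (Python) =====
-- import re
--
-- def tokenize_commas(tokens):
--     def repl(m):
--         s = m.string
--         before = s[m.start()-1:m.start()] if m.start() > 0 else ''
--         after = s[m.end():m.end()+1]
--         return ',' if before.isdigit() and after.isdigit() else ''
--     subbed = [re.sub(r',+', repl, token) for token in tokens]
--     return [t for t in subbed if t]
-- ===== Notes on version B (the rewrite author's own statement) =====
-- stated objective: idiomatic
-- what changed: A repeatedly re-runs str.find and splices the string to delete one comma per iteration; B makes a single regex pass (re.sub on ',+') that rewrites each maximal comma run at once to ',' iff it is flanked by digits, else to ''.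
import Mathlib
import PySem

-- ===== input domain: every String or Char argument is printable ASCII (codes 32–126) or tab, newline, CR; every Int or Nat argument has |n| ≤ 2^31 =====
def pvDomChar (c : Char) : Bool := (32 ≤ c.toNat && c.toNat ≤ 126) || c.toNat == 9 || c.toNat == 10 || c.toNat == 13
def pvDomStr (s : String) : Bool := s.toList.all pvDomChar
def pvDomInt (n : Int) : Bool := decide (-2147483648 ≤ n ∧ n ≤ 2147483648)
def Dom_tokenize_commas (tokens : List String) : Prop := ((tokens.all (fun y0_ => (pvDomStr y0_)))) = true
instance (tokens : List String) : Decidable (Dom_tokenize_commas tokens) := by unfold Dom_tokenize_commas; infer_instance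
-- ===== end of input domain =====

-- B replaces A's repeated in-place comma surgery (re-running str.find after every deletion)
-- by a single left-to-right pass that rewrites each maximal comma run at once (re.sub in Source B).

-- Python's str.isdigit on a single char: exact on the ASCII domain (Dom).
def isDig (c : Char) : Bool := c.isDigit

-- ===== PORT A =====
-- token.find(',', start_pos): first index ≥ p holding ',' (none = Python's -1); ported by hand, exact.
def findFrom (s : List Char) (p : Nat) : Option Nat :=
  ((s.drop p).findIdx? (· == ',')).map (· + p)

-- A's while loop: delete / keep one comma per iteration, resuming the find at start_pos.
-- The fuel argument is only a totality guard: 2*len(token)+1 steps always suffice (proved in mainLoop).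
def loopAGo : Nat → List Char → Nat → List Char
  | 0, s, _ => s
  | fuel + 1, s, p =>
    match findFrom s p with
    | none => s
    | some i =>
      if i = 0 then
        loopAGo fuel (s.drop 1) 0
      else if i = s.length - 1 then
        loopAGo fuel (s.take (s.length - 1)) i
      else if ¬ (isDig (s.getD (i-1) ' ') ∧ isDig (s.getD (i+1) ' ')) then
        loopAGo fuel (s.take i ++ s.drop (i+1)) i
      else
        loopAGo fuel s (i + 1)

def loopA (s : List Char) (p : Nat) : List Char :=
  loopAGo (2 * s.length + 1) s p

def tokenize_commas (tokens : List String) : List String :=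
  tokens.foldl (fun acc token =>
    let t := String.mk (loopA token.toList 0)
    if t ≠ "" then acc ++ [t] else acc) []

-- ===== PORT B =====
-- is the char after the run a digit (''.isdigit() = False on the empty lookahead)
def digHead (cs : List Char) : Bool :=
  match cs with
  | [] => false
  | c :: _ => isDig c

-- re.sub(r',+', repl, token): each maximal comma run becomes ',' iff flanked by digits, else ''.
-- The fuel argument is only a totality guard: len(cs)+1 steps always suffice.
def procBGo : Nat → Bool → List Char → List Char
  | 0, _, _ => []
  | fuel + 1, pd, cs =>
    match cs with
    | [] => []
    | c :: rest =>
      if c = ',' then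
        let tail := rest.dropWhile (· == ',')
        (if pd && digHead tail then [','] else []) ++ procBGo fuel false tail
      else
        c :: procBGo fuel (isDig c) rest

def procB (pd : Bool) (cs : List Char) : List Char :=
  procBGo (cs.length + 1) pd cs

def tokenize_commas_alt (tokens : List String) : List String :=
  ((tokens.map (fun token => String.mk (procB false token.toList))).filter (fun t => t ≠ ""))

-- ===== PRECONDITION & SPEC =====
def Spec_tokenize_commas (tokens : List String) (out : List String) : Prop := out = tokenize_commas_alt tokens
instance (tokens : List String) (out : List String) : Decidable (Spec_tokenize_commas tokens out) := by unfold Spec_tokenize_commas; infer_instance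

-- ===== CLAIM (what is proved, stated in full; the proofs are below) =====
def Claim_equal_tokenize_commas : Prop := ∀ (tokens : List String), Dom_tokenize_commas tokens → Spec_tokenize_commas tokens (tokenize_commas tokens)

-- ===== LEMMAS AND PROOFS =====

theorem findFrom_some_facts {s : List Char} {p i : Nat} (h : findFrom s p = some i) :
    p ≤ i ∧ i < s.length ∧ s.getD i ' ' = ',' ∧ ∀ j, p ≤ j → j < i → s.getD j ' ' ≠ ',' := by
  unfold findFrom at h
  rcases Option.map_eq_some_iff.mp h with ⟨k, hk, rfl⟩
  rw [List.findIdx?_eq_some_iff_getElem] at hk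
  rcases hk with ⟨hklt, hkp, hmin⟩
  rw [List.getElem_drop] at hkp
  have hlen : p + k < s.length := by
    have := s.length_drop (i := p); omega
  have hkd : s.getD (p + k) ' ' = ',' := by
    rw [List.getD_eq_getElem s ' ' hlen]; exact beq_iff_eq.mp hkp
  refine ⟨by omega, by omega, ?_, ?_⟩
  · rw [Nat.add_comm k p]; exact hkd
  · intro j hpj hji hcomma
    have hj : j - p < k := by omega
    have hthis := hmin (j - p) hj
    have hh : (List.drop p s)[j - p]'(by omega) = s[j]'(by omega) := by
      rw [List.getElem_drop]; congr 1; omega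
    rw [hh] at hthis
    rw [List.getD_eq_getElem s ' ' (by omega)] at hcomma
    rw [hcomma] at hthis
    simp at hthis


theorem procBGo_irrel : ∀ f1 f2 pd (cs : List Char), cs.length < f1 → cs.length < f2 →
    procBGo f1 pd cs = procBGo f2 pd cs := by
  intro f1
  induction f1 with
  | zero => intro f2 pd cs h1 h2; omega
  | succ f1 ih =>
    intro f2 pd cs h1 h2
    cases f2 with
    | zero => omega
    | succ f2 =>
      cases cs with
      | nil => rfl
      | cons c rest =>
        simp only [List.length_cons] at h1 h2
        by_cases hc : c = ','
        · subst hc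
          have hlen := List.length_dropWhile_le (· == ',') rest
          simp only [procBGo]
          simp only [if_pos trivial]
          rw [ih f2 false (rest.dropWhile (· == ',')) (by omega) (by omega)]
        · simp only [procBGo, if_neg hc]
          rw [ih f2 (isDig c) rest (by omega) (by omega)]

theorem procB_nil (pd : Bool) : procB pd [] = [] := rfl

theorem procB_cons_ne (pd : Bool) (c : Char) (rest : List Char) (hc : c ≠ ',') :
    procB pd (c :: rest) = c :: procB (isDig c) rest := by
  simp only [procB, List.length_cons, procBGo, if_neg hc]

theorem procB_cons_comma (pd : Bool) (rest : List Char) :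
    procB pd (',' :: rest) =
      (if pd && digHead (rest.dropWhile (· == ',')) then [','] else [])
        ++ procB false (rest.dropWhile (· == ',')) := by
  have hlen := List.length_dropWhile_le (· == ',') rest
  simp only [procB, List.length_cons, procBGo]
  simp only [if_pos trivial]
  congr 1
  exact procBGo_irrel (rest.length + 1) ((rest.dropWhile (· == ',')).length + 1) false
    (rest.dropWhile (· == ',')) (by omega) (by omega)

theorem findFrom_none_facts {s : List Char} {p : Nat} (h : findFrom s p = none) :
    ∀ j, p ≤ j → j < s.length → s.getD j ' ' ≠ ',' := by
  unfold findFrom at h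
  rw [Option.map_eq_none_iff, List.findIdx?_eq_none_iff] at h
  intro j hpj hjl hc
  have hmem : s.getD j ' ' ∈ s.drop p := by
    rw [List.getD_eq_getElem s ' ' hjl]
    have hh : s[j] = (s.drop p)[j - p]'(by simp [List.length_drop]; omega) := by
      rw [List.getElem_drop]; congr 1; omega
    rw [hh]; exact List.getElem_mem _
  have h2 := h _ hmem
  rw [hc] at h2
  simp at h2


-- the "previous char is a digit" flag B would carry at position p
def pdAt (s : List Char) (p : Nat) : Bool :=
  match p with
  | 0 => false
  | q + 1 => isDig (s.getD q ' ')

-- A's loop invariant: every comma strictly before start_pos is flanked by digits on both sides.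
def LoopInv (s : List Char) (p : Nat) : Prop :=
  p ≤ s.length ∧ ∀ j, j < p → s.getD j ' ' = ',' →
    0 < j ∧ isDig (s.getD (j-1) ' ') ∧ j + 1 < s.length ∧ isDig (s.getD (j+1) ' ')

theorem procB_prefix (mid : List Char) (pd : Bool) (rest : List Char)
    (h : ∀ c ∈ mid, c ≠ ',') :
    procB pd (mid ++ rest) = mid ++ procB ((mid.getLast?.map isDig).getD pd) rest := by
  induction mid generalizing pd with
  | nil => simp
  | cons c mid ih =>
    have hc : c ≠ ',' := h c (by simp)
    have hrec := ih (isDig c) (fun x hx => h x (by simp [hx]))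
    rw [List.cons_append, procB_cons_ne _ _ _ hc, hrec]
    cases mid with
    | nil => simp
    | cons d mid2 =>
      have hy := List.getLast?_eq_some_getLast (l := d :: mid2) (h := by simp)
      simp [List.getLast?_cons_cons, hy]

theorem procB_del (pd : Bool) (t : List Char) (h : ¬ (pd = true ∧ digHead t = true)) :
    procB pd (',' :: t) = procB pd t := by
  cases t with
  | nil => simp [procB_cons_comma, procB_nil, digHead]
  | cons c t2 =>
    by_cases hc : c = ','
    · subst hc
      simp [procB_cons_comma]
    · have hdh : (pd && digHead (c :: t2)) = false := by
        cases pd <;> simp_all [digHead]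
      simp [procB_cons_comma, procB_cons_ne, hc, hdh]

theorem procB_keep (t : List Char) (h : digHead t = true) :
    procB true (',' :: t) = ',' :: procB false t := by
  cases t with
  | nil => simp [digHead] at h
  | cons c t2 =>
    have hc : c ≠ ',' := by
      intro hcc; rw [hcc] at h
      simp only [digHead] at h
      exact absurd h (by decide)
    simp [procB_cons_comma, procB_cons_ne, hc, h]

-- decomposition of the suffix at the first comma i: drop p = mid ++ ',' :: drop (i+1)
theorem drop_decomp {s : List Char} {p i : Nat} (hpi : p ≤ i) (hil : i < s.length) :
    s.drop p = (s.take i).drop p ++ s.getD i ' ' :: s.drop (i + 1) := by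
  have h1 : s.getD i ' ' :: s.drop (i + 1) = s.drop i := by
    rw [List.getD_eq_getElem s ' ' hil]; exact List.getElem_cons_drop hil
  rw [h1]
  conv_lhs => rw [← List.take_append_drop i s]
  rw [List.drop_append_of_le_length (by simp [List.length_take]; omega)]

theorem take_merge {s : List Char} {p i : Nat} (hpi : p ≤ i) :
    s.take p ++ (s.take i).drop p = s.take i := by
  conv_rhs => rw [← List.take_append_drop p (s.take i)]
  congr 1
  rw [List.take_take]
  congr 1
  omega

theorem mid_nocomma {s : List Char} {p i : Nat} (hil : i < s.length)
    (hmin : ∀ j, p ≤ j → j < i → s.getD j ' ' ≠ ',') :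
    ∀ c ∈ (s.take i).drop p, c ≠ ',' := by
  intro c hc
  rcases List.getElem_of_mem hc with ⟨k, hk, hck⟩
  rw [List.getElem_drop] at hck
  have hlen : p + k < i := by
    have h1 := List.length_drop (l := s.take i) (i := p)
    have h2 : (s.take i).length = min i s.length := List.length_take ..
    omega
  rw [List.getElem_take] at hck
  intro hcc
  exact hmin (p + k) (by omega) hlen (by rw [List.getD_eq_getElem s ' ' (by omega), hck, hcc])

theorem mid_pd {s : List Char} {p i : Nat} (hpi : p ≤ i) (hil : i < s.length) :
    ((((s.take i).drop p).getLast?.map isDig).getD (pdAt s p)) = pdAt s i := by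
  by_cases hpe : p = i
  · subst hpe
    simp
  · have hlt : p < i := by omega
    have hne : (s.take i).drop p ≠ [] := by
      have h2 : (s.take i).length = min i s.length := List.length_take ..
      intro hnil
      have h3 := List.length_drop (l := s.take i) (i := p)
      rw [hnil] at h3
      simp at h3
      omega
    have hlast := List.getLast?_eq_some_getLast (l := (s.take i).drop p) (h := hne)
    have hgl : ((s.take i).drop p).getLast hne = s.getD (i - 1) ' ' := by
      rw [List.getLast_eq_getElem]
      have h2 : (s.take i).length = min i s.length := List.length_take ..
      have hlen : ((s.take i).drop p).length = i - p := by
        have := List.length_drop (l := s.take i) (i := p); omega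
      rw [List.getElem_drop, List.getElem_take]
      rw [List.getD_eq_getElem s ' ' (by omega)]
      congr 1
      omega
    rw [hlast]
    simp only [Option.map_some, Option.getD_some, hgl]
    cases hi : i with
    | zero => omega
    | succ q => simp [pdAt]

-- getD of the modified strings agrees with getD of s below the surgery point
theorem getD_take_lt {s : List Char} {i j : Nat} (hj : j < i) (hil : i ≤ s.length) :
    (s.take i).getD j ' ' = s.getD j ' ' := by
  rw [List.getD_eq_getElem _ ' ' (by simp [List.length_take]; omega),
      List.getD_eq_getElem s ' ' (by omega), List.getElem_take]

theorem getD_surgery_lt {s : List Char} {i j : Nat} (hj : j < i) (hil : i < s.length) :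
    ((s.take i ++ s.drop (i+1)).getD j ' ') = s.getD j ' ' := by
  have hlt : (s.take i).length = i := by simp [List.length_take]; omega
  rw [List.getD_eq_getElem _ ' ' (by simp [List.length_take, List.length_drop]; omega)]
  rw [List.getElem_append_left (by omega)]
  rw [List.getD_eq_getElem s ' ' (by omega), List.getElem_take]

-- ===== the main correspondence: A's loop from state (s, p) = untouched prefix ++ B's pass on the suffix =====
theorem mainLoop : ∀ n s p, 2 * s.length - p < n → LoopInv s p →
    loopAGo n s p = s.take p ++ procB (pdAt s p) (s.drop p) := by
  intro n
  induction n with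
  | zero => intro s p hn; omega
  | succ n ih =>
    intro s p hn hinv
    obtain ⟨hple, hprev⟩ := hinv
    simp only [loopAGo]
    split
    · -- findFrom s p = none : no comma at ≥ p, procB is the identity on the comma-free suffix
      next hfind =>
      have hno := findFrom_none_facts hfind
      have hfree : ∀ c ∈ s.drop p, c ≠ ',' := by
        intro c hc
        rcases List.getElem_of_mem hc with ⟨k, hk, hck⟩
        rw [List.getElem_drop] at hck
        have hlen : p + k < s.length := by have := List.length_drop (l := s) (i := p); omega
        intro hcc
        exact hno (p + k) (by omega) hlen (by rw [List.getD_eq_getElem s ' ' hlen, hck, hcc])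
      have hpp := procB_prefix (s.drop p) (pdAt s p) [] hfree
      rw [List.append_nil] at hpp
      rw [hpp]
      simp [procB_nil, List.take_append_drop]
    · next i hfind =>
      obtain ⟨hpi, hil, hci, hmin⟩ := findFrom_some_facts hfind
      have hdecomp := drop_decomp hpi hil
      have hmidfree := mid_nocomma hil hmin
      have hsplit : procB (pdAt s p) (s.drop p)
          = (s.take i).drop p ++ procB (pdAt s i) (s.getD i ' ' :: s.drop (i + 1)) := by
        rw [hdecomp, procB_prefix _ _ _ hmidfree, mid_pd hpi hil]
      by_cases hi0 : i = 0
      · subst hi0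
        have hp0 : p = 0 := by omega
        subst hp0
        rw [if_pos rfl]
        have hinv' : LoopInv (s.drop 1) 0 := ⟨by omega, by omega⟩
        rw [ih (s.drop 1) 0 (by simp only [List.length_drop]; omega) hinv']
        rw [hsplit, hci]
        simp only [List.take_zero, List.nil_append, List.drop_zero, pdAt]
        rw [procB_del false _ (by simp)]
      · rw [if_neg hi0]
        by_cases hiend : i = s.length - 1
        · rw [if_pos hiend]
          -- the final comma is deleted; the remaining prefix holds no comma at ≥ p
          have htklen : (s.take (s.length - 1)).length = s.length - 1 := by
            simp only [List.length_take]; omega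
          have hinv' : LoopInv (s.take (s.length - 1)) i := by
            refine ⟨by omega, ?_⟩
            intro j hj hcj
            rw [getD_take_lt (by omega) (by omega)] at hcj
            by_cases hjp : j < p
            · obtain ⟨h1, h2, h3, h4⟩ := hprev j hjp hcj
              have hj1 : j + 1 ≠ i := by
                intro he; rw [he, hci] at h4; exact absurd h4 (by decide)
              refine ⟨h1, ?_, by omega, ?_⟩
              · rw [getD_take_lt (by omega) (by omega)]; exact h2
              · rw [getD_take_lt (by omega) (by omega)]; exact h4
            · exact absurd hcj (hmin j (by omega) (by omega))
          rw [ih _ i (by rw [htklen]; omega) hinv']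
          have hfree2 : ∀ c ∈ (s.take (s.length - 1)).drop i, c ≠ ',' := by
            intro c hc
            have hnil : (s.take (s.length - 1)).drop i = [] := by
              apply List.drop_eq_nil_of_le; omega
            rw [hnil] at hc; simp at hc
          have hpp := procB_prefix ((s.take (s.length - 1)).drop i) (pdAt (s.take (s.length-1)) i) [] hfree2
          rw [List.append_nil] at hpp
          rw [hpp]
          simp only [procB_nil, List.append_nil, List.take_append_drop]
          rw [hsplit, hci]
          have hdropnil : s.drop (i + 1) = [] := by
            apply List.drop_eq_nil_of_le; omega
          rw [hdropnil, procB_del _ _ (by simp [digHead])]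
          simp only [procB_nil, List.append_nil]
          rw [take_merge hpi]
          congr 1
          omega
        · rw [if_neg hiend]
          have hi1l : i + 1 < s.length := by omega
          have hdh : digHead (s.drop (i+1)) = isDig (s.getD (i+1) ' ') := by
            have hcons : s.drop (i+1) = s.getD (i+1) ' ' :: s.drop (i+2) := by
              rw [List.getD_eq_getElem s ' ' hi1l]
              exact (List.getElem_cons_drop hi1l).symm
            rw [hcons]
            simp [digHead]
          have hpdA : pdAt s i = isDig (s.getD (i-1) ' ') := by
            cases hii : i with
            | zero => omega
            | succ q => simp [pdAt]
          by_cases hdig : isDig (s.getD (i-1) ' ') ∧ isDig (s.getD (i+1) ' ')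
          · -- keep: both neighbours digits, advance start_pos past the comma
            rw [if_neg (by simpa using hdig)]
            have hinv' : LoopInv s (i + 1) := by
              refine ⟨by omega, ?_⟩
              intro j hj hcj
              by_cases hjp : j < p
              · exact hprev j hjp hcj
              · by_cases hji : j < i
                · exact absurd hcj (hmin j (by omega) hji)
                · have hje : j = i := by omega
                  subst hje
                  exact ⟨by omega, hdig.1, by omega, hdig.2⟩
            rw [ih s (i+1) (by omega) hinv']
            rw [hsplit, hci, hpdA, hdig.1]
            rw [procB_keep _ (by rw [hdh]; exact hdig.2)]
            have hpd' : pdAt s (i+1) = false := by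
              simp only [pdAt]; rw [hci]; decide
            rw [hpd']
            rw [← List.append_assoc, take_merge hpi]
            have hsi : s[i]'hil = ',' := by
              rw [← List.getD_eq_getElem s ' ' hil]; exact hci
            have htake : s.take (i+1) = s.take i ++ [','] := by
              rw [List.take_add_one, List.getElem?_eq_getElem hil, hsi]
              rfl
            rw [htake]
            simp
          · -- delete: a neighbour is not a digit
            rw [if_pos (by simpa using hdig)]
            have hslen : (s.take i ++ s.drop (i+1)).length = s.length - 1 := by
              simp only [List.length_append, List.length_take, List.length_drop]; omega
            have hinv' : LoopInv (s.take i ++ s.drop (i+1)) i := by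
              refine ⟨by rw [hslen]; omega, ?_⟩
              intro j hj hcj
              rw [getD_surgery_lt hj hil] at hcj
              by_cases hjp : j < p
              · obtain ⟨h1, h2, h3, h4⟩ := hprev j hjp hcj
                have hj1 : j + 1 ≠ i := by
                  intro he; rw [he, hci] at h4; exact absurd h4 (by decide)
                refine ⟨h1, ?_, ?_, ?_⟩
                · rw [getD_surgery_lt (by omega) hil]; exact h2
                · rw [hslen]; omega
                · rw [getD_surgery_lt (by omega) hil]; exact h4
              · exact absurd hcj (hmin j (by omega) hj)
            rw [ih _ i (by rw [hslen]; omega) hinv']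
            have hti : (s.take i).length = i := by simp only [List.length_take]; omega
            have ht : (s.take i ++ s.drop (i+1)).take i = s.take i := by
              rw [List.take_append_of_le_length (by omega)]
              rw [List.take_take]
              simp
            have hd : (s.take i ++ s.drop (i+1)).drop i = s.drop (i+1) := by
              rw [List.drop_append_of_le_length (by omega)]
              have hnil : (s.take i).drop i = [] := by
                apply List.drop_eq_nil_of_le; omega
              rw [hnil, List.nil_append]
            have hpd2 : pdAt (s.take i ++ s.drop (i+1)) i = pdAt s i := by
              cases hii : i with
              | zero => omega
              | succ q =>
                simp only [pdAt]
                rw [← hii]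
                rw [getD_surgery_lt (by omega) hil]
            rw [ht, hd, hpd2, hpdA]
            rw [hsplit, hci, hpdA]
            rw [procB_del _ _ (by rw [hdh]; tauto)]
            rw [← List.append_assoc, take_merge hpi]

theorem tokA_eq_tokB (cs : List Char) : loopA cs 0 = procB false cs := by
  have := mainLoop (2 * cs.length + 1) cs 0 (by omega) ⟨by omega, by omega⟩
  simpa [loopA, pdAt] using this

-- ===== VERDICT (by name: the statement is the Claim_ definition above) =====
theorem tokenize_commas_spec : Claim_equal_tokenize_commas := by
  intro tokens _
  unfold Spec_tokenize_commas tokenize_commas tokenize_commas_alt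
  have hfun : (fun (acc : List String) (token : String) =>
        let t := String.mk (loopA token.toList 0)
        if t ≠ "" then acc ++ [t] else acc)
      = (fun (acc : List String) (token : String) =>
        if decide (String.mk (procB false token.toList) ≠ "") = true then
          acc ++ [String.mk (procB false token.toList)] else acc) := by
    funext acc token
    simp [tokA_eq_tokB]
  rw [hfun, PySem.List.foldl_append_if, List.nil_append, List.filter_map]
  simp only [Function.comp_def]
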